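-- pv_equiv track=rewrite | github.com/iamkissg/nowcoder | campus/Bytedance/22.py | give_up
-- ===== SOURCE A (Python) =====
-- import heapq
--
-- def give_up(questions, time):
--
--         result = [0]
--         p2 = 0
--
--         while p2 < len(questions):
--             answered = questions[:p2]
--             heapq._heapify_max(answered)
--             rest_time = time-sum(answered)
--             tmp = 0
--             if questions[p2] > rest_time:
--                 while rest_time < questions[p2]:
--                     # cancel = answered.index(max(answered))
--                     # rest_time += answered.pop(cancel)
--                     rest_time += heapq._heappop_max(answered)
--                     tmp += 1
--             # answered.append(questions[p2])
--             # result.append(result[-1]+tmp)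
--             result.append(tmp)
--             # rest_time -= questions[p2]
--             p2 += 1
--         return result[1:]
-- ===== SOURCE B (Python) =====
-- def give_up(questions, time):
--     # Incrementally maintained descending-sorted prefix + running sum,
--     # instead of re-heapifying and re-summing the whole prefix at every index.
--     res = []
--     desc = []      # previous questions, sorted descending
--     total = 0      # sum of previous questions
--     for q in questions:
--         deficit = q - (time - total)
--         cnt = 0
--         i = 0
--         while deficit > 0:
--             deficit -= desc[i]
--             i += 1
--             cnt += 1
--         res.append(cnt)
--         j = 0
--         while j < len(desc) and desc[j] >= q:
--             j += 1
--         desc.insert(j, q)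
--         total += q
--     return res
-- ===== Notes on version B (the rewrite author's own statement) =====
-- stated objective: faster
-- what changed: Instead of re-building a max-heap over the whole prefix and re-summing it at every index, B maintains the processed prefix as an incrementally updated descending-sorted list with a running sum and walks it to count the cancellations.
import Mathlib
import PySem

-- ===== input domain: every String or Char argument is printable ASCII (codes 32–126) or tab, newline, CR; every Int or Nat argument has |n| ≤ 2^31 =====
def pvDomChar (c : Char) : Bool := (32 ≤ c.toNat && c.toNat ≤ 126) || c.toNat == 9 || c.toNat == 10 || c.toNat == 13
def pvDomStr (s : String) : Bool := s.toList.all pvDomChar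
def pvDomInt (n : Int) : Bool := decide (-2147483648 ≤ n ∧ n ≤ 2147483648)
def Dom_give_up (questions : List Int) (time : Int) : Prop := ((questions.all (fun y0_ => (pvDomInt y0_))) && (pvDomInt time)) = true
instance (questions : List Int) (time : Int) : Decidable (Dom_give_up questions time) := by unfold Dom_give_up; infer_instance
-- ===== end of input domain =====

-- B replaces A's per-index re-heapify + re-sum of the whole prefix by an incrementally
-- maintained descending-sorted prefix with a running sum (objective: faster, constant-factor).

-- ===== PORT A =====
-- inner while loop: 'while rest_time < q: rest_time += heappop_max; tmp += 1'.
-- heapq._heapify_max / _heappop_max are modelled by a descending sort + head pop: a max-heap pop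
-- returns a maximum of the remaining items, and only the popped VALUES affect rest_time and tmp,
-- so this is value-exact. Popping the empty heap raises IndexError in Python (excluded by Pre_);
-- there the port stops and returns the count so far.
def popA : List Int → Int → Int → Int
  | [], _, _ => 0
  | x :: t, rest, need => if rest < need then 1 + popA t (rest + x) need else 0

def give_up (questions : List Int) (time : Int) : List Int :=
  -- 'while p2 < len(questions)' reading questions[p2] is the traversal of enumerate(questions)
  ((PySem.List.enumerate questions 0).foldl
      (fun (result : List Int) (iq : Int × Int) =>
        let answered := PySem.List.sorted (PySem.List.slice questions none (some iq.1)) (fun x => x) true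
        let rest_time := time - answered.sum
        let tmp := if iq.2 > rest_time then popA answered rest_time iq.2 else 0
        result ++ [tmp])
      ([0] : List Int)).drop 1

-- ===== PORT B =====
-- 'while deficit > 0: deficit -= desc[i]; …' ; desc[i] past the end raises IndexError in Python
-- (excluded by Pre_); there the port stops and returns the count so far.
def countB : List Int → Int → Int
  | [], _ => 0
  | x :: t, d => if 0 < d then 1 + countB t (d - x) else 0

-- linear insertion keeping the list sorted descending
def insDesc (q : Int) : List Int → List Int
  | [] => [q]
  | x :: t => if q ≤ x then x :: insDesc q t else q :: x :: t

def give_up_alt (questions : List Int) (time : Int) : List Int :=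
  (questions.foldl
    (fun (st : List Int × List Int × Int) q =>
      let cnt := countB st.2.1 (q - (time - st.2.2))
      (st.1 ++ [cnt], insDesc q st.2.1, st.2.2 + q))
    (([], [], 0) : List Int × List Int × Int)).1

-- ===== PRECONDITION & SPEC =====
-- Exactly the inputs on which Python A returns normally: at every index i some number j of the
-- smallest previous questions may remain un-cancelled within the time budget; otherwise both
-- programs pop/index past the end of the prefix and raise IndexError.
def Pre_give_up (questions : List Int) (time : Int) : Prop :=
  ∀ i : Fin questions.length, ∃ j ≤ (i : Nat),
    ((PySem.List.sorted (questions.take (i : Nat)) (fun x => x) false).take j).sum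
      ≤ time - questions[i]
instance (questions : List Int) (time : Int) : Decidable (Pre_give_up questions time) := by
  unfold Pre_give_up; infer_instance
def pvWitness_give_up : List Int × Int := ([3, 1, 2], 6)

def Spec_give_up (questions : List Int) (time : Int) (out : List Int) : Prop := out = give_up_alt questions time
instance (questions : List Int) (time : Int) (out : List Int) : Decidable (Spec_give_up questions time out) := by unfold Spec_give_up; infer_instance

-- ===== CLAIM (what is proved, stated in full; the proofs are below) =====
def Claim_equal_give_up : Prop := ∀ (questions : List Int) (time : Int), Dom_give_up questions time → Pre_give_up questions time → Spec_give_up questions time (give_up questions time)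

-- ===== LEMMAS AND PROOFS =====

-- A's guarded pop loop and B's deficit loop count the same thing
theorem popA_of_ge (s : List Int) (rest need : Int) (h : ¬ rest < need) : popA s rest need = 0 := by
  cases s <;> simp [popA, h]

-- A's guarded pop loop and B's deficit loop count the same thing
theorem popA_eq_countB (s : List Int) (rest need : Int) :
    (if need > rest then popA s rest need else 0) = countB s (need - rest) := by
  induction s generalizing rest with
  | nil => simp [popA, countB]
  | cons x t ih =>
      simp only [popA, countB]
      by_cases h : rest < need
      · have hih := ih (rest + x)
        simp only [gt_iff_lt, if_pos h, if_pos (show (0:Int) < need - rest by omega)]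
        by_cases h2 : rest + x < need
        · simp only [gt_iff_lt, if_pos h2] at hih
          rw [show need - rest - x = need - (rest + x) by ring, ← hih]
        · simp only [gt_iff_lt, if_neg h2] at hih
          rw [show need - rest - x = need - (rest + x) by ring, ← hih, popA_of_ge t _ _ h2]
      · simp [h]

theorem mem_insDesc (q y : Int) (l : List Int) : y ∈ insDesc q l ↔ y = q ∨ y ∈ l := by
  induction l with
  | nil => simp [insDesc]
  | cons x t ih =>
      simp only [insDesc]
      by_cases h : q ≤ x
      · simp [h, ih]; tauto
      · simp [h]

theorem perm_insDesc (q : Int) (l : List Int) : (insDesc q l).Perm (q :: l) := by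
  induction l with
  | nil => simp [insDesc]
  | cons x t ih =>
      simp only [insDesc]
      by_cases h : q ≤ x
      · simp only [if_pos h]
        exact ((ih.cons x).trans (List.Perm.swap q x t))
      · simp [h]

theorem pairwise_insDesc (q : Int) (l : List Int)
    (hl : l.Pairwise (fun a b => b ≤ a)) : (insDesc q l).Pairwise (fun a b => b ≤ a) := by
  induction l with
  | nil => simp [insDesc]
  | cons x t ih =>
      rcases List.pairwise_cons.mp hl with ⟨hx, ht⟩
      by_cases h : q ≤ x
      · simp only [insDesc, if_pos h]
        refine List.pairwise_cons.mpr ⟨?_, ih ht⟩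
        intro y hy
        rcases (mem_insDesc q y t).mp hy with rfl | hyt
        · exact h
        · exact hx y hyt
      · simp only [insDesc, if_neg h]
        refine List.pairwise_cons.mpr ⟨?_, hl⟩
        intro y hy
        rcases List.mem_cons.mp hy with rfl | hyt
        · omega
        · exact le_trans (hx y hyt) (by omega)

-- inserting into the descending sort of xs gives the descending sort of xs ++ [q]
theorem insDesc_sortedDesc (q : Int) (xs : List Int) :
    insDesc q (PySem.List.sorted xs (fun x => x) true)
      = PySem.List.sorted (xs ++ [q]) (fun x => x) true := by
  have hperm : (insDesc q (PySem.List.sorted xs (fun x => x) true)).Perm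
      (PySem.List.sorted (xs ++ [q]) (fun x => x) true) := by
    refine ((perm_insDesc q _).trans ?_).trans (PySem.List.sorted_perm _ _ _).symm
    exact ((PySem.List.sorted_perm xs (fun x => x) true).cons q).trans
      (List.perm_append_comm (l₁ := [q]) (l₂ := xs))
  have h1 : (insDesc q (PySem.List.sorted xs (fun x => x) true)).Pairwise (fun a b => b ≤ a) :=
    pairwise_insDesc q _ (by simpa using PySem.List.sorted_pairwise_rev xs (fun x => x))
  have h2 : (PySem.List.sorted (xs ++ [q]) (fun x => x) true).Pairwise (fun a b => b ≤ a) := by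
    simpa using PySem.List.sorted_pairwise_rev (xs ++ [q]) (fun x => x)
  exact hperm.eq_of_pairwise (fun a b _ _ hab hba => le_antisymm hba hab) h1 h2

-- the loop-body correspondence, by induction over the remaining questions with the processed prefix
theorem key_lemma (questions : List Int) (time : Int) :
    ∀ (l pre res : List Int), pre ++ l = questions →
      (l.foldl
        (fun (st : List Int × List Int × Int) q =>
          let cnt := countB st.2.1 (q - (time - st.2.2))
          (st.1 ++ [cnt], insDesc q st.2.1, st.2.2 + q))
        (res, PySem.List.sorted pre (fun x => x) true, pre.sum)).1
      = (PySem.List.enumerate l (pre.length : Int)).foldl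
          (fun (result : List Int) (iq : Int × Int) =>
            let answered := PySem.List.sorted (PySem.List.slice questions none (some iq.1)) (fun x => x) true
            let rest_time := time - answered.sum
            let tmp := if iq.2 > rest_time then popA answered rest_time iq.2 else 0
            result ++ [tmp]) res := by
  intro l
  induction l with
  | nil => intro pre res _; simp [PySem.List.enumerate]
  | cons q l' ih =>
      intro pre res hpre
      rw [PySem.List.enumerate_cons]
      simp only [List.foldl_cons]
      have htake : PySem.List.slice questions none (some (pre.length : Int)) = pre := by
        rw [PySem.List.slice_to_natCast, ← hpre, List.take_left]
      have hsum : (PySem.List.sorted pre (fun x => x) true).sum = pre.sum :=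
        (PySem.List.sorted_perm pre (fun x => x) true).sum_eq
      have hcnt :
          (if q > time - (PySem.List.sorted (PySem.List.slice questions none (some (pre.length : Int))) (fun x => x) true).sum
            then popA (PySem.List.sorted (PySem.List.slice questions none (some (pre.length : Int))) (fun x => x) true)
              (time - (PySem.List.sorted (PySem.List.slice questions none (some (pre.length : Int))) (fun x => x) true).sum) q
            else 0)
          = countB (PySem.List.sorted pre (fun x => x) true) (q - (time - pre.sum)) := by
        rw [htake, hsum, popA_eq_countB]
      have hmain := ih (pre ++ [q]) (res ++ [countB (PySem.List.sorted pre (fun x => x) true) (q - (time - pre.sum))])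
        (by simpa using hpre)
      simp only [List.sum_append, List.sum_cons, List.sum_nil, List.length_append,
        List.length_cons, List.length_nil] at hmain
      rw [← insDesc_sortedDesc] at hmain
      rw [show pre.sum + (q + 0) = pre.sum + q by ring] at hmain
      rw [show ((pre.length + (0 + 1) : Nat) : Int) = (pre.length : Int) + 1 by push_cast; ring] at hmain
      rw [hcnt]
      exact hmain

-- ===== VERDICT (by name: the statement is the Claim_ definition above) =====
theorem give_up_spec : Claim_equal_give_up := by
  intro questions time _ _
  unfold Spec_give_up give_up give_up_alt
  have h : (questions.foldl
      (fun (st : List Int × List Int × Int) q =>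
        let cnt := countB st.2.1 (q - (time - st.2.2))
        (st.1 ++ [cnt], insDesc q st.2.1, st.2.2 + q))
      (([], [], 0) : List Int × List Int × Int)).1
      = (PySem.List.enumerate questions 0).foldl
          (fun (result : List Int) (iq : Int × Int) =>
            let answered := PySem.List.sorted (PySem.List.slice questions none (some iq.1)) (fun x => x) true
            let rest_time := time - answered.sum
            let tmp := if iq.2 > rest_time then popA answered rest_time iq.2 else 0
            result ++ [tmp]) [] := key_lemma questions time questions [] [] rfl
  rw [h]
  simp only []
  rw [PySem.List.foldl_append_singleton_eq_map, PySem.List.foldl_append_singleton_eq_map]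
  simp
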